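-- pv_equiv track=rewrite | github.com/daniel-reich/ubiquitous-fiesta | 4s9kNQFfk4D4Lbm4q_4.py | ABA
-- ===== SOURCE A (Python) =====
-- def ABA(s):
--
--   CODE = "ABCDEFGHIJKLMNOPQRSTUVWXYZ"
--
--   Block = "A"
--
--   Counter = 1
--   Length = CODE.index(s)
--
--   while (Counter <= Length):
--
--     Letter = CODE[Counter]
--     Batch = Block + Letter + Block
--     Block = Batch
--     Counter += 1
--
--   return Block
-- ===== SOURCE B (Python) =====
-- def ABA(s):
--   CODE = "ABCDEFGHIJKLMNOPQRSTUVWXYZ"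
--   Length = CODE.index(s)
--   def build(k):
--     if k == 0:
--       return "A"
--     half = build(k - 1)
--     return half + CODE[k] + half
--   return build(Length)
-- ===== Notes on version B (the rewrite author's own statement) =====
-- stated objective: alternative
-- what changed: Replaces the iterative while-loop doubling of a mutable Block with a recursive helper build(k) = build(k-1) + CODE[k] + build(k-1) realizing the palindrome recurrence directly (the shared half is computed once per level).
import Mathlib
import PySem

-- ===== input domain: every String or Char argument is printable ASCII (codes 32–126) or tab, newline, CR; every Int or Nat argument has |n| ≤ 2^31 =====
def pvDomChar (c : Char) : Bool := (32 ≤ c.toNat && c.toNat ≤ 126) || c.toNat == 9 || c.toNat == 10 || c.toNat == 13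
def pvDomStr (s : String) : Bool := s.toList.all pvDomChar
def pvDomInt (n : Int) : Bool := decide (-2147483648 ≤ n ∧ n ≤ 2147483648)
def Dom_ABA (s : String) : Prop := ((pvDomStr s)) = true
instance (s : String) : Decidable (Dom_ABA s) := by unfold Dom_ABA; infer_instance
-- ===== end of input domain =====

-- B replaces A's iterative while-loop doubling with a recursive helper realizing the
-- palindrome recurrence build(k) = build(k-1) + CODE[k] + build(k-1); same cost (alternative decomposition).


-- ===== PORT A =====
-- the while loop: Counter from 1 while Counter ≤ Length, Block := Block + CODE[Counter] + Block
-- (CODE[Counter] is always in range when the loop body runs: Counter ≤ Length ≤ 25)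
def abaLoop (code : List Char) (length : Nat) (counter : Nat) (block : List Char) : List Char :=
  if counter ≤ length then
    abaLoop code length (counter + 1)
      (block ++ [PySem.List.pyGetD code (counter : Int) 'A'] ++ block)
  else block
termination_by length + 1 - counter

def ABA (s : String) : String :=
  let code := "ABCDEFGHIJKLMNOPQRSTUVWXYZ"
  -- CODE.index(s): under Pre_ABA, find ≥ 0 (ValueError excluded by Pre_)
  let length := (PySem.Str.find code s).toNat
  String.mk (abaLoop code.toList length 1 ['A'])

-- ===== PORT B =====
-- build 0 = "A"; build (k+1) = build k + CODE[k+1] + build k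
def abaBuild (code : List Char) : Nat → List Char
  | 0 => ['A']
  | k + 1 => abaBuild code k ++ [PySem.List.pyGetD code ((k + 1 : Nat) : Int) 'A'] ++ abaBuild code k

def ABA_alt (s : String) : String :=
  let code := "ABCDEFGHIJKLMNOPQRSTUVWXYZ"
  let length := (PySem.Str.find code s).toNat
  String.mk (abaBuild code.toList length)

-- ===== PRECONDITION & SPEC =====
-- Pre_ excludes exactly the inputs where CODE.index(s) raises ValueError: s not a substring of CODE
def Pre_ABA (s : String) : Prop := PySem.Str.isIn s "ABCDEFGHIJKLMNOPQRSTUVWXYZ" = true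
instance (s : String) : Decidable (Pre_ABA s) := by unfold Pre_ABA; infer_instance
def pvWitness_ABA : String := "C"

def Spec_ABA (s : String) (out : String) : Prop := out = ABA_alt s
instance (s : String) (out : String) : Decidable (Spec_ABA s out) := by unfold Spec_ABA; infer_instance

-- ===== CLAIM (what is proved, stated in full; the proofs are below) =====
def Claim_equal_ABA : Prop := ∀ (s : String), Dom_ABA s → Pre_ABA s → Spec_ABA s (ABA s)

-- ===== LEMMAS AND PROOFS =====
-- loop invariant: starting the loop at counter c with block = build (c-1) yields build length
lemma abaLoop_eq_build (code : List Char) (length : Nat) :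
    ∀ (k c : Nat), 1 ≤ c → c + k = length + 1 →
      abaLoop code length c (abaBuild code (c - 1)) = abaBuild code length := by
  intro k
  induction k with
  | zero =>
    intro c hc hsum
    rw [abaLoop]
    simp only [show ¬ c ≤ length by omega, if_false]
    congr 1
    omega
  | succ k ih =>
    intro c hc hsum
    rw [abaLoop]
    simp only [show c ≤ length by omega, if_true]
    have hbuild : abaBuild code (c - 1) ++ [PySem.List.pyGetD code (c : Int) 'A'] ++
        abaBuild code (c - 1) = abaBuild code c := by
      obtain ⟨m, rfl⟩ : ∃ m, c = m + 1 := ⟨c - 1, by omega⟩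
      simp [abaBuild]
    rw [hbuild]
    have := ih (c + 1) (by omega) (by omega)
    simpa using this

-- ===== VERDICT (by name: the statement is the Claim_ definition above) =====
theorem ABA_spec : Claim_equal_ABA := by
  intro s _ _
  unfold Spec_ABA ABA ABA_alt
  have h := abaLoop_eq_build "ABCDEFGHIJKLMNOPQRSTUVWXYZ".toList
      (PySem.Str.find "ABCDEFGHIJKLMNOPQRSTUVWXYZ" s).toNat
      (PySem.Str.find "ABCDEFGHIJKLMNOPQRSTUVWXYZ" s).toNat 1 (by omega) (by omega)
  simpa [abaBuild] using congrArg String.mk h
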